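-- pv_equiv track=rewrite | github.com/AnwarAllal23/renpy-translator-gui | core/rpy_parser.py | _indent_len
-- ===== SOURCE A (Python) =====
-- def _indent_len(s: str) -> int:
--     n = 0
--     for ch in s:
--         if ch == ' ':
--             n += 1
--         elif ch == '\t':
--             n += 4
--         else:
--             break
--     return n
-- ===== SOURCE B (Python) =====
-- def _indent_len(s: str) -> int:
--     indent = s[:len(s) - len(s.lstrip(' \t'))]
--     return len(indent) + 3 * indent.count('\t')
-- ===== Notes on version B (the rewrite author's own statement) =====
-- stated objective: simpler
-- what changed: Replaces the per-character accumulate-with-break loop by locating the indent boundary with lstrip and computing the width as a closed form len + 3*tab_count over that prefix.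
import Mathlib
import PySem

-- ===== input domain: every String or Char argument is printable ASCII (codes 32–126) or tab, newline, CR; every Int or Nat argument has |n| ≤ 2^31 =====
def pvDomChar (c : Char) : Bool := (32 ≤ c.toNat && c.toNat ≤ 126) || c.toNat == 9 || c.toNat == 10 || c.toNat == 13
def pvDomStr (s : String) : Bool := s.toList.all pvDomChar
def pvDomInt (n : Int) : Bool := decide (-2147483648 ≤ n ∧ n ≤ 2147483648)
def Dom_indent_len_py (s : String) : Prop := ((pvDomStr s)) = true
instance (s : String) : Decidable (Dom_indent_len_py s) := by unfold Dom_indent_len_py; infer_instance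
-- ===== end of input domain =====

-- B replaces A's per-character accumulate-with-break loop by an lstrip boundary find
-- plus the closed form len(indent) + 3*indent.count('\t'); objective: simpler.

-- ===== PORT A =====
-- the 'for ch in s' loop with accumulator n and break
def indent_len_go (cs : List Char) (n : Int) : Int :=
  match cs with
  | [] => n
  | ch :: rest =>
    if ch = ' ' then indent_len_go rest (n + 1)
    else if ch = '\t' then indent_len_go rest (n + 4)
    else n

def indent_len_py (s : String) : Int := indent_len_go s.toList 0

-- ===== PORT B =====
-- hand port of s.lstrip(' \t') (PySem has no chars-argument lstrip); exact: Python's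
-- lstrip(' \t') removes exactly the leading run of ' '/'\t' characters
def lstripST (cs : List Char) : List Char :=
  match cs with
  | [] => []
  | c :: rest => if c = ' ' || c = '\t' then lstripST rest else c :: rest

def indent_len_py_alt (s : String) : Int :=
  -- indent = s[:len(s) - len(s.lstrip(' \t'))]
  let indent := PySem.List.slice s.toList none
      (some ((s.toList.length : Int) - ((lstripST s.toList).length : Int)))
  -- return len(indent) + 3 * indent.count('\t')
  (indent.length : Int) + 3 * (PySem.Chars.count indent ['\t'] : Int)

-- ===== PRECONDITION & SPEC =====
def Spec_indent_len_py (s : String) (out : Int) : Prop := out = indent_len_py_alt s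
instance (s : String) (out : Int) : Decidable (Spec_indent_len_py s out) := by unfold Spec_indent_len_py; infer_instance

-- ===== CLAIM (what is proved, stated in full; the proofs are below) =====
def Claim_equal_indent_len_py : Prop := ∀ (s : String), Dom_indent_len_py s → Spec_indent_len_py s (indent_len_py s)

-- ===== LEMMAS AND PROOFS =====

theorem lstripST_eq_dropWhile (cs : List Char) :
    lstripST cs = cs.dropWhile (fun c => c = ' ' || c = '\t') := by
  induction cs with
  | nil => rfl
  | cons c rest ih =>
    by_cases h : (c = ' ' || c = '\t') = true
    · simp [lstripST, List.dropWhile, h, ih]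
    · simp [lstripST, List.dropWhile, h]

theorem count_go_tab (fuel : Nat) (cs : List Char) (acc : Nat) (h : cs.length ≤ fuel) :
    PySem.Chars.count.go ['\t'] fuel cs acc = acc + cs.count '\t' := by
  induction fuel generalizing cs acc with
  | zero =>
    cases cs with
    | nil => simp [PySem.Chars.count.go]
    | cons c t => simp at h
  | succ f ih =>
    cases cs with
    | nil => simp [PySem.Chars.count.go]
    | cons c t =>
      simp only [PySem.Chars.count.go, List.isPrefixOf, List.length_cons, List.count_cons]
      have ht : t.length ≤ f := by simp at h; omega
      by_cases hc : c = '\t'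
      · simp [hc, ih _ _ ht]; omega
      · simp [hc, Ne.symm hc, ih _ _ ht]

theorem count_tab_single (cs : List Char) :
    PySem.Chars.count cs ['\t'] = cs.count '\t' := by
  simp [PySem.Chars.count, count_go_tab cs.length cs 0 le_rfl]

theorem indent_len_go_spec (cs : List Char) (n : Int) :
    indent_len_go cs n =
      n + ((cs.takeWhile (fun c => c = ' ' || c = '\t')).length : Int)
        + 3 * ((cs.takeWhile (fun c => c = ' ' || c = '\t')).count '\t' : Int) := by
  induction cs generalizing n with
  | nil => simp [indent_len_go]
  | cons c rest ih =>
    by_cases hs : c = ' '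
    · simp [indent_len_go, hs, List.takeWhile, ih]
      ring
    · by_cases ht : c = '\t'
      · simp [indent_len_go, ht, List.takeWhile, ih]
        ring
      · simp [indent_len_go, hs, ht, List.takeWhile]

theorem indent_take_eq (cs : List Char) :
    PySem.List.slice cs none (some ((cs.length : Int) - ((lstripST cs).length : Int)))
      = cs.takeWhile (fun c => c = ' ' || c = '\t') := by
  rw [lstripST_eq_dropWhile]
  have hk : (cs.length : Int) - ((cs.dropWhile (fun c => c = ' ' || c = '\t')).length : Int)
      = ((cs.takeWhile (fun c => c = ' ' || c = '\t')).length : Int) := by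
    have := List.takeWhile_append_dropWhile (p := fun c => c = ' ' || c = '\t') (l := cs)
    have hlen : (cs.takeWhile (fun c => c = ' ' || c = '\t')).length
        + (cs.dropWhile (fun c => c = ' ' || c = '\t')).length = cs.length := by
      rw [← List.length_append, this]
    omega
  rw [hk, PySem.List.slice_to_natCast]
  nth_rewrite 2 [← List.takeWhile_append_dropWhile (p := fun c => c = ' ' || c = '\t') (l := cs)]
  exact List.take_left

-- ===== VERDICT (by name: the statement is the Claim_ definition above) =====
theorem indent_len_py_spec : Claim_equal_indent_len_py := by
  intro s _
  unfold Spec_indent_len_py indent_len_py indent_len_py_alt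
  simp only [indent_take_eq, count_tab_single, indent_len_go_spec]
  ring
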